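-- pv_equiv track=rewrite | github.com/drodda/advent_of_code | aoc_2024/day_22.py | calculate_price_sequences
-- ===== SOURCE A (Python) =====
-- SECRET_NUMBER_STEPS = [
--     # Multiply by 64
--     lambda n: n << 6,
--     # Divide by 32
--     lambda n: n >> 5,
--     # Multiply by 2048
--     lambda n: n << 11,
-- ]
--
-- def next_secret_number(secret_number):
--     """Calculate the next sequence number for a given secret number"""
--     for op in SECRET_NUMBER_STEPS:
--         secret_number = secret_number ^ op(secret_number)
--         secret_number = secret_number % 16777216
--     return secret_number
--
-- def calculate_secret_numbers(secret_number, n):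
--     """Generate the next n secret numbers"""
--     for _ in range(n):
--         secret_number = next_secret_number(secret_number)
--         yield secret_number
--
-- def calculate_price_sequences(secret_number, n):
--     """Generate the first n price delta sequences"""
--     old_price = secret_number % 10
--     price_deltas = tuple()
--     for secret_number in calculate_secret_numbers(secret_number, n):
--         price = secret_number % 10
--         price_delta = price - old_price
--         price_deltas = price_deltas[-3:] + (price_delta, )
--         if len(price_deltas) == 4:
--             yield price_deltas, price
--         old_price = price
-- ===== SOURCE B (Python) =====
-- def calculate_price_sequences(secret_number, n):
--     """Generate the first n price delta sequences"""
--     prices = [secret_number % 10]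
--     s = secret_number
--     for _ in range(n):
--         s = (s ^ (s << 6)) % 16777216
--         s = (s ^ (s >> 5)) % 16777216
--         s = (s ^ (s << 11)) % 16777216
--         prices.append(s % 10)
--     deltas = [prices[i + 1] - prices[i] for i in range(len(prices) - 1)]
--     for i in range(len(deltas) - 3):
--         yield (deltas[i], deltas[i + 1], deltas[i + 2], deltas[i + 3]), prices[i + 4]
-- ===== Notes on version B (the rewrite author's own statement) =====
-- stated objective: alternative
-- what changed: Replaced the streaming rolling-window tuple accumulator (slice-and-append state carried through the generator loop) by a precompute-then-index decomposition: build the full price list, derive the consecutive-delta list, then emit windows by a second indexed pass.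
import Mathlib
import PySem

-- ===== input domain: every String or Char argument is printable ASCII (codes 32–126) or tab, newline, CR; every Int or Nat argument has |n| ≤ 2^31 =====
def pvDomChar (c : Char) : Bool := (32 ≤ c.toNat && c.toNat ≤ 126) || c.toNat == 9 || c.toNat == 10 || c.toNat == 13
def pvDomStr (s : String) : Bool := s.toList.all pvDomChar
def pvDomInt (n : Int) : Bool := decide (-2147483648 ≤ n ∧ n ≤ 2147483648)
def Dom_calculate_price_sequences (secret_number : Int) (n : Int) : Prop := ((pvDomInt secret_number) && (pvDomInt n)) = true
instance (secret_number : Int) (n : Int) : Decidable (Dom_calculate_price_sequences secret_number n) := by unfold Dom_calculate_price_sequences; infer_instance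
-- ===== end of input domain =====

-- B replaces A's streaming rolling-window tuple accumulator by a precompute-then-index
-- decomposition (full price list, then delta list, then windows by index); alternative, same cost.


-- ===== PORT A =====
def SECRET_NUMBER_STEPS : List (Int → Int) :=
  [fun n => n <<< (6 : Nat), fun n => n >>> (5 : Nat), fun n => n <<< (11 : Nat)]

def next_secret_number (secret_number : Int) : Int :=
  SECRET_NUMBER_STEPS.foldl
    (fun s op => PySem.Int.mod (PySem.Int.bxor s (op s)) 16777216) secret_number

-- the generator calculate_secret_numbers, materialised in yield order
def calc_secrets_go (s : Int) : Nat → List Int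
  | 0 => []
  | k + 1 => let s' := next_secret_number s; s' :: calc_secrets_go s' k

def calculate_secret_numbers (secret_number : Int) (n : Int) : List Int :=
  calc_secrets_go secret_number n.toNat

-- A's loop: state (old_price, price_deltas); yields collected in order
def goA (old : Int) (pd : List Int) : List Int → List ((Int × Int × Int × Int) × Int)
  | [] => []
  | s :: rest =>
    let price := PySem.Int.mod s 10
    let price_delta := price - old
    let pd' := PySem.List.slice pd (some (-3)) none ++ [price_delta]
    (match pd' with
     | [a, b, c, d] => [((a, b, c, d), price)]   -- the 'if len(price_deltas) == 4: yield'
     | _ => []) ++ goA price pd' rest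

def calculate_price_sequences (secret_number : Int) (n : Int) :
    List ((Int × Int × Int × Int) × Int) :=
  goA (PySem.Int.mod secret_number 10) [] (calculate_secret_numbers secret_number n)

-- ===== PORT B =====
def prices_go (s : Int) : Nat → List Int
  | 0 => []
  | k + 1 =>
    let s1 := PySem.Int.mod (PySem.Int.bxor s (s <<< (6 : Nat))) 16777216
    let s2 := PySem.Int.mod (PySem.Int.bxor s1 (s1 >>> (5 : Nat))) 16777216
    let s3 := PySem.Int.mod (PySem.Int.bxor s2 (s2 <<< (11 : Nat))) 16777216
    PySem.Int.mod s3 10 :: prices_go s3 k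

def calculate_price_sequences_alt (secret_number : Int) (n : Int) :
    List ((Int × Int × Int × Int) × Int) :=
  let prices := PySem.Int.mod secret_number 10 :: prices_go secret_number n.toNat
  let deltas := (List.range (prices.length - 1)).map
    (fun i => prices.getD (i + 1) 0 - prices.getD i 0)
  (List.range (deltas.length - 3)).map
    (fun i => ((deltas.getD i 0, deltas.getD (i + 1) 0,
                deltas.getD (i + 2) 0, deltas.getD (i + 3) 0),
               prices.getD (i + 4) 0))

-- ===== PRECONDITION & SPEC =====
def Spec_calculate_price_sequences (secret_number : Int) (n : Int) (out : List ((Int × Int × Int × Int) × Int)) : Prop := out = calculate_price_sequences_alt secret_number n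
instance (secret_number : Int) (n : Int) (out : List ((Int × Int × Int × Int) × Int)) : Decidable (Spec_calculate_price_sequences secret_number n out) := by unfold Spec_calculate_price_sequences; infer_instance

-- ===== CLAIM (what is proved, stated in full; the proofs are below) =====
def Claim_equal_calculate_price_sequences : Prop := ∀ (secret_number : Int) (n : Int), Dom_calculate_price_sequences secret_number n → Spec_calculate_price_sequences secret_number n (calculate_price_sequences secret_number n)

-- ===== LEMMAS AND PROOFS =====

-- B's inlined PRNG steps compute the same price stream as A's secret-number generator
theorem prices_go_eq (s : Int) (k : Nat) :
    prices_go s k = (calc_secrets_go s k).map (fun x => PySem.Int.mod x 10) := by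
  induction k generalizing s with
  | zero => rfl
  | succ k ih =>
    simp only [prices_go, calc_secrets_go, List.map, next_secret_number,
      SECRET_NUMBER_STEPS, List.foldl]
    exact congrArg _ (ih _)

-- A's loop on the secret numbers equals the same loop run directly on the prices
def goQ (old : Int) (pd : List Int) : List Int → List ((Int × Int × Int × Int) × Int)
  | [] => []
  | p :: rest =>
    let pd' := PySem.List.slice pd (some (-3)) none ++ [p - old]
    (match pd' with
     | [a, b, c, d] => [((a, b, c, d), p)]
     | _ => []) ++ goQ p pd' rest

theorem goA_eq_goQ (l : List Int) (old : Int) (pd : List Int) :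
    goA old pd l = goQ old pd (l.map (fun x => PySem.Int.mod x 10)) := by
  induction l generalizing old pd with
  | nil => rfl
  | cons s rest ih => simp only [goA, goQ, List.map_cons, ih]

-- consecutive deltas of the price stream old :: q
def deltasOf (old : Int) : List Int → List Int
  | [] => []
  | p :: rest => (p - old) :: deltasOf p rest

theorem length_deltasOf (old : Int) (q : List Int) : (deltasOf old q).length = q.length := by
  induction q generalizing old with
  | nil => rfl
  | cons p rest ih => simp [deltasOf, ih]

theorem lastGetD (a old : Int) (rest : List Int) :
    rest.getLast?.getD a = (a :: rest).getLast?.getD old := by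
  cases rest with
  | nil => rfl
  | cons h t => simp [List.getLast?_cons]

theorem deltasOf_snoc (old : Int) (q : List Int) (p : Int) :
    deltasOf old (q ++ [p]) = deltasOf old q ++ [p - q.getLastD old] := by
  induction q generalizing old with
  | nil => rfl
  | cons a rest ih =>
    simp [deltasOf, ih]
    exact lastGetD a old rest

-- B's indexed delta list is deltasOf
theorem deltasB_eq (old : Int) (q : List Int) :
    (List.range ((old :: q).length - 1)).map
      (fun i => (old :: q).getD (i + 1) 0 - (old :: q).getD i 0) = deltasOf old q := by
  induction q generalizing old with
  | nil => rfl
  | cons p rest ih =>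
    have h : (old :: p :: rest).length - 1 = ((p :: rest).length - 1) + 1 := by simp
    rw [h, List.range_succ_eq_map]
    simp only [List.map_cons, List.map_map]
    refine congrArg₂ _ (by simp) ?_
    rw [← ih p]
    rfl

-- the state A's loop folds
def stepP (st : Int × List Int) (p : Int) : Int × List Int :=
  (p, PySem.List.slice st.2 (some (-3)) none ++ [p - st.1])

theorem slice_neg3 (l : List Int) :
    PySem.List.slice l (some (-3)) none = l.drop (l.length - 3) := by
  exact PySem.List.slice_from_neg_ofNat l 3 (by norm_num)

theorem goQ_append (old : Int) (pd : List Int) (q r : List Int) :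
    goQ old pd (q ++ r) =
      goQ old pd q ++
        goQ (q.foldl stepP (old, pd)).1 (q.foldl stepP (old, pd)).2 r := by
  induction q generalizing old pd with
  | nil => rfl
  | cons p rest ih =>
    simp only [List.cons_append, goQ, List.foldl_cons, ih, List.append_assoc]
    rfl

theorem fold_fst (q : List Int) (old : Int) (pd : List Int) :
    (q.foldl stepP (old, pd)).1 = q.getLastD old := by
  induction q generalizing old pd with
  | nil => rfl
  | cons p rest ih =>
    simp [List.foldl_cons, stepP, ih]
    exact lastGetD p old rest

def rtake (l : List Int) (k : Nat) : List Int := l.drop (l.length - k)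

theorem rtake_rtake3 (l : List Int) : rtake (rtake l 4) 3 = rtake l 3 := by
  simp only [rtake, List.drop_drop, List.length_drop]
  congr 1
  omega

theorem rtake_snoc (l : List Int) (d : Int) : rtake l 3 ++ [d] = rtake (l ++ [d]) 4 := by
  simp only [rtake, List.length_append, List.length_cons, List.length_nil]
  rw [List.drop_append_of_le_length (by omega)]
  have h : l.length + (0 + 1) - 4 = l.length - 3 := by omega
  rw [h]

theorem fold_snd (q : List Int) (old : Int) (D : List Int) :
    (q.foldl stepP (old, rtake D 4)).2 = rtake (D ++ deltasOf old q) 4 := by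
  induction q generalizing old D with
  | nil => simp [deltasOf]
  | cons p rest ih =>
    simp only [List.foldl_cons, stepP, slice_neg3]
    have h1 : (rtake D 4).drop ((rtake D 4).length - 3) ++ [p - old]
        = rtake (D ++ [p - old]) 4 := by
      rw [show (rtake D 4).drop ((rtake D 4).length - 3) = rtake (rtake D 4) 3 from rfl,
        rtake_rtake3, rtake_snoc]
    rw [h1, ih p (D ++ [p - old])]
    simp [deltasOf]

theorem drop_three (D : List Int) (h : 3 ≤ D.length) :
    D.drop (D.length - 3) =
      [D.getD (D.length - 3) 0, D.getD (D.length - 2) 0, D.getD (D.length - 1) 0] := by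
  have hl : (D.drop (D.length - 3)).length = 3 := by simp; omega
  apply List.ext_getElem
  · simp [hl]
  · intro i h1 h2
    rw [List.getElem_drop]
    have hi : i < 3 := by omega
    interval_cases i <;>
      simp only [List.getElem_cons_zero, List.getElem_cons_succ] <;>
      rw [List.getD_eq_getElem _ _ (by omega)] <;> congr 1 <;> omega

-- B's window construction over an arbitrary price list
def winB (prices : List Int) : List ((Int × Int × Int × Int) × Int) :=
  let deltas := (List.range (prices.length - 1)).map
    (fun i => prices.getD (i + 1) 0 - prices.getD i 0)
  (List.range (deltas.length - 3)).map
    (fun i => ((deltas.getD i 0, deltas.getD (i + 1) 0,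
                deltas.getD (i + 2) 0, deltas.getD (i + 3) 0),
               prices.getD (i + 4) 0))

theorem winB_eq (old : Int) (q : List Int) :
    winB (old :: q) =
      (List.range ((deltasOf old q).length - 3)).map
        (fun i => (((deltasOf old q).getD i 0, (deltasOf old q).getD (i + 1) 0,
                    (deltasOf old q).getD (i + 2) 0, (deltasOf old q).getD (i + 3) 0),
                   (old :: q).getD (i + 4) 0)) := by
  unfold winB
  rw [deltasB_eq]

-- the main induction: A's streaming loop equals B's indexed windows
theorem goQ_eq_winB (q : List Int) (old : Int) :
    goQ old [] q = winB (old :: q) := by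
  induction q using List.reverseRecOn generalizing old with
  | nil => simp [goQ, winB]
  | append_singleton q p ih =>
    rw [goQ_append old [] q [p], fold_fst]
    rw [show (q.foldl stepP (old, ([] : List Int))).2
          = (q.foldl stepP (old, rtake [] 4)).2 from rfl, fold_snd, List.nil_append]
    set o' := q.getLastD old with ho'
    set D := deltasOf old q with hD
    have hm : D.length = q.length := length_deltasOf old q
    rw [winB_eq, ih old, winB_eq, deltasOf_snoc, ← ho', ← hD]
    have hlen : (D ++ [p - o']).length = D.length + 1 := by simp
    rw [hlen]
    have hdrop : (rtake D 4).drop ((rtake D 4).length - 3) = D.drop (D.length - 3) := by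
      rw [show (rtake D 4).drop ((rtake D 4).length - 3) = rtake (rtake D 4) 3 from rfl,
        rtake_rtake3]
      rfl
    by_cases h3 : 3 ≤ D.length
    · -- one new window is appended
      have hr : D.length + 1 - 3 = (D.length - 3) + 1 := by omega
      rw [hr, List.range_succ, List.map_append]
      congr 1
      · -- the windows already emitted are unchanged
        apply List.map_congr_left
        intro i hi
        have hi' : i < D.length - 3 := List.mem_range.mp hi
        have e1 : ∀ j, j < D.length → (D ++ [p - o']).getD j 0 = D.getD j 0 := by
          intro j hj
          rw [List.getD_append _ _ _ _ (by omega)]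
        have e2 : (old :: (q ++ [p])).getD (i + 4) 0 = (old :: q).getD (i + 4) 0 := by
          rw [← List.cons_append, List.getD_append _ _ _ _ (by simp; omega)]
        rw [e1 i (by omega), e1 (i + 1) (by omega), e1 (i + 2) (by omega),
          e1 (i + 3) (by omega), e2]
      · -- the new window equals the yield of A's final loop step
        simp only [List.map_cons, List.map_nil, goQ, slice_neg3, List.append_nil]
        rw [hdrop, drop_three D h3]
        simp only [List.cons_append, List.nil_append]
        have g1 : ∀ j, j < D.length → (D ++ [p - o']).getD j 0 = D.getD j 0 := by
          intro j hj
          rw [List.getD_append _ _ _ _ (by omega)]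
        have g2 : (D ++ [p - o']).getD D.length 0 = p - o' := by
          rw [List.getD_eq_getElem _ _ (by simp)]
          simp
        have g3 : (old :: (q ++ [p])).getD (D.length - 3 + 4) 0 = p := by
          have h4 : D.length - 3 + 4 = q.length + 1 := by omega
          rw [h4, ← List.cons_append, List.getD_eq_getElem _ _ (by simp),
            List.getElem_append_right (by simp)]
          simp
        have g4 : D.length - 3 + 1 = D.length - 2 := by omega
        have g5 : D.length - 3 + 2 = D.length - 1 := by omega
        have g6 : D.length - 3 + 3 = D.length := by omega
        rw [g4, g5, g6, g1 (D.length - 3) (by omega), g1 (D.length - 2) (by omega),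
          g1 (D.length - 1) (by omega), g2, g3]
    · -- fewer than four deltas so far: neither side emits a window
      have hA : goQ o' (rtake D 4) [p] = [] := by
        simp only [goQ, slice_neg3]
        rw [hdrop, show D.length - 3 = 0 by omega, List.drop_zero]
        match D, (by omega : D.length < 3) with
        | [], _ => rfl
        | [_], _ => rfl
        | [_, _], _ => rfl
      rw [hA, List.append_nil, show D.length + 1 - 3 = 0 by omega,
        show D.length - 3 = 0 by omega]
      rfl

-- ===== VERDICT (by name: the statement is the Claim_ definition above) =====
theorem calculate_price_sequences_spec : Claim_equal_calculate_price_sequences := by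
  intro s n _
  unfold Spec_calculate_price_sequences calculate_price_sequences calculate_price_sequences_alt
    calculate_secret_numbers
  rw [goA_eq_goQ, goQ_eq_winB, prices_go_eq]
  rfl
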